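-- pv_equiv track=rewrite | github.com/jiajunma/unipotentrepn | combunipotent/drc.py | S_Wrepns_D
-- ===== SOURCE A (Python) =====
-- import itertools
--
-- def S_Wrepns_D(tau):
--     """
--     Type D
--     Special representation ot set of representation in
--     coherent continuations.
--     the formula is
--     (c_{2i},c_{2i-1})<--> (c_{2i-1}-1,c_{2i}+1)
--
--     We assume tauL and tauR are arranged in incresing order
--     """
--
--     tauL, tauR = tau
--     assert(len(tauL) == len(tauR))
--     a = len(tauL)
--     tauL,tauR = sorted(tauL), sorted(tauR)
--     # tauL[i-1] = c_{2i-1}, tauR[i] = c_{2i}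
--     cidxs = [i for i in range(1,a) if tauL[i-1]!=tauR[i]+1]
--     Atau = []
--     for k in range(len(cidxs)+1):
--         for oidxs in itertools.combinations(cidxs,k):
--             tauLL= [tauR[i]+1 if i in oidxs else tauL[i-1] for i in range(1,a)]+[tauL[a-1]]
--             tauRR= [tauR[0]]+[tauL[i-1]-1 if i in oidxs else tauR[i] for i in range(1,a)]
--             Atau.append(reg_tau((tauLL,tauRR)))
--     return Atau
--
-- def reg_tau(tau):
--     tauL,tauR=tau
--     tauL = sorted([x for x in tauL if x!=0],reverse=True)
--     tauR = sorted([x for x in tauR if x!=0],reverse=True)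
--     return (tauL,tauR)
-- ===== SOURCE B (Python) =====
-- def S_Wrepns_D(tau):
--     tauL, tauR = tau
--     assert len(tauL) == len(tauR)
--     tauL, tauR = sorted(tauL), sorted(tauR)
--     a = len(tauL)
--     cidxs = [i for i in range(1, a) if tauL[i - 1] != tauR[i] + 1]
--     # breadth-first walk of the subset lattice of cidxs: level k holds the
--     # size-k subsets' already-flipped pairs; each child applies ONE new flip
--     # to its parent's pair, so a subset is never rebuilt from scratch.
--     out = []
--     frontier = [(cidxs, list(tauL), list(tauR))]
--     while frontier:
--         for _, LL, RR in frontier: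
--             out.append((_dsort(LL), _dsort(RR)))
--         frontier = [c for node in frontier for c in _children(node, tauL, tauR)]
--     return out
--
-- def _children(node, tauL, tauR):
--     rest, LL, RR = node
--     kids = []
--     while rest:
--         i, rest = rest[0], rest[1:]
--         LL2, RR2 = list(LL), list(RR)
--         LL2[i - 1] = tauR[i] + 1
--         RR2[i] = tauL[i - 1] - 1
--         kids.append((rest, LL2, RR2))
--     return kids
--
-- def _dsort(xs):
--     return sorted(x for x in xs if x != 0)[::-1]
-- ===== Notes on version B (the rewrite author's own statement) =====
-- stated objective: alternative
-- what changed: B drops itertools.combinations entirely: it walks the subset lattice of the flippable indices breadth-first (level k = size-k subsets), each child obtained from its parent's already-flipped pair by applying exactly ONE new flip, instead of A's per-subset membership-tested comprehensions over all indices.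
-- crash fix: On the empty input ([], []) A raises IndexError (tauL[a-1] with a = 0) while B returns [([], [])]. — e.g. on S_Wrepns_D([], []): A raises IndexError, B returns [([], [])]
import Mathlib
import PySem

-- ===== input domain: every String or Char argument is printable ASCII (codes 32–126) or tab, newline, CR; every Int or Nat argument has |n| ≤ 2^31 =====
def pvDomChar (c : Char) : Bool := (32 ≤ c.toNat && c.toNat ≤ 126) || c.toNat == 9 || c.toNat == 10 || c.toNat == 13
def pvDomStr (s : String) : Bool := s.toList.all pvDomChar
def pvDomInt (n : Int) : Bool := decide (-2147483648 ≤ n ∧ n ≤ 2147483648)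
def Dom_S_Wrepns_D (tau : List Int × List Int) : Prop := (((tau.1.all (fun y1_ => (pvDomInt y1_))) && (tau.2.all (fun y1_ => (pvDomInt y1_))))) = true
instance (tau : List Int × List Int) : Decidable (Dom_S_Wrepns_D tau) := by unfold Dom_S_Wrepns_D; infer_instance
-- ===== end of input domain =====

-- B replaces A's itertools.combinations + membership-tested comprehensions by a breadth-first
-- walk of the subset lattice of the flippable indices, each child applying one new flip to its
-- parent's already-flipped pair (objective: alternative).

-- ===== PORT A =====
-- reg_tau: filter zeros, sort each side descending (sorted(..., reverse=True))
def reg_tau (tau : List Int × List Int) : List Int × List Int :=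
  (PySem.List.sorted (tau.1.filter (fun x => x ≠ 0)) (fun x => x) true,
   PySem.List.sorted (tau.2.filter (fun x => x ≠ 0)) (fun x => x) true)

def S_Wrepns_D (tau : List Int × List Int) : List (List Int × List Int) :=
  let tauL0 := tau.1
  let tauR0 := tau.2
  -- assert len(tauL)==len(tauR): raises on mismatch, excluded by Pre_
  let a : Int := PySem.List.len tauL0
  let tauL := PySem.List.sorted tauL0 (fun x => x) false
  let tauR := PySem.List.sorted tauR0 (fun x => x) false
  let cidxs := (PySem.List.pyRange 1 a 1).filter
      (fun i => PySem.List.pyGetD tauL (i - 1) 0 ≠ PySem.List.pyGetD tauR i 0 + 1)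
  -- for k in range(len(cidxs)+1): for oidxs in combinations(cidxs, k): ...
  -- (k ranges over 0..len(cidxs), so k.toNat is exact)
  (PySem.List.pyRange 0 (PySem.List.len cidxs + 1) 1).foldl (fun Atau k =>
    (PySem.List.combinations cidxs k.toNat).foldl (fun Atau oidxs =>
      let tauLL := ((PySem.List.pyRange 1 a 1).map (fun i =>
          if oidxs.contains i then PySem.List.pyGetD tauR i 0 + 1
          else PySem.List.pyGetD tauL (i - 1) 0)) ++ [PySem.List.pyGetD tauL (a - 1) 0]
      let tauRR := [PySem.List.pyGetD tauR 0 0] ++ (PySem.List.pyRange 1 a 1).map (fun i =>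
          if oidxs.contains i then PySem.List.pyGetD tauL (i - 1) 0 - 1
          else PySem.List.pyGetD tauR i 0)
      Atau ++ [reg_tau (tauLL, tauRR)]) Atau) []

-- ===== PORT B =====
-- _dsort: sorted(filter nonzero)[::-1]  (s[::-1] ported via slice?, none never occurs: step -1 ≠ 0)
def dsortB (xs : List Int) : List Int :=
  (PySem.List.slice? (PySem.List.sorted (xs.filter (fun x => x ≠ 0)) (fun x => x) false)
      none none (-1)).getD []

-- _children: peel `rest` front-to-back; each child applies ONE new flip to the parent's pair
def childrenB (tauL tauR : List Int) :
    List Int → List Int → List Int → List (List Int × List Int × List Int)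
  | [], _, _ => []
  | i :: rest, LL, RR =>
      (rest, PySem.List.pySetD LL (i - 1) (PySem.List.pyGetD tauR i 0 + 1),
             PySem.List.pySetD RR i (PySem.List.pyGetD tauL (i - 1) 0 - 1))
        :: childrenB tauL tauR rest LL RR

-- the `while frontier:` loop; fuel only makes the recursion structural (len(cidxs)+1 levels run)
def bfsB (tauL tauR : List Int) :
    Nat → List (List Int × List Int × List Int) → List (List Int × List Int)
  | 0, _ => []
  | _ + 1, [] => []
  | fuel + 1, t :: ts =>
      ((t :: ts).map (fun n => (dsortB n.2.1, dsortB n.2.2)))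
        ++ bfsB tauL tauR fuel ((t :: ts).flatMap (fun n => childrenB tauL tauR n.1 n.2.1 n.2.2))

def S_Wrepns_D_alt (tau : List Int × List Int) : List (List Int × List Int) :=
  let tauL := PySem.List.sorted tau.1 (fun x => x) false
  let tauR := PySem.List.sorted tau.2 (fun x => x) false
  let cidxs := (PySem.List.pyRange 1 (PySem.List.len tauL) 1).filter
      (fun i => PySem.List.pyGetD tauL (i - 1) 0 ≠ PySem.List.pyGetD tauR i 0 + 1)
  bfsB tauL tauR (cidxs.length + 1) [(cidxs, tauL, tauR)]

-- ===== PRECONDITION & SPEC =====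
-- Pre_ excludes exactly the inputs where A raises: mismatched lengths (AssertionError) and
-- empty sides (tauL[a-1] with a = 0 is an IndexError).
def Pre_S_Wrepns_D (tau : List Int × List Int) : Prop :=
  tau.1.length = tau.2.length ∧ tau.1 ≠ []
instance (tau : List Int × List Int) : Decidable (Pre_S_Wrepns_D tau) := by
  unfold Pre_S_Wrepns_D; infer_instance

def pvWitness_S_Wrepns_D : (List Int × List Int) := ([2, 0], [1, 3])

-- On the empty input ([], []) A raises IndexError (tauL[a-1] with a = 0) while B returns [([], [])].
def Raises_S_Wrepns_D (tau : List Int × List Int) : Prop :=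
  tau.1 = [] ∧ tau.2 = []
instance (tau : List Int × List Int) : Decidable (Raises_S_Wrepns_D tau) := by
  unfold Raises_S_Wrepns_D; infer_instance

def pvRaiseWitness_S_Wrepns_D : (List Int × List Int) := ([], [])
def pvRaiseWitnessOut_S_Wrepns_D : List (List Int × List Int) := [([], [])]

def Spec_S_Wrepns_D (tau : List Int × List Int) (out : List (List Int × List Int)) : Prop :=
  out = S_Wrepns_D_alt tau
instance (tau : List Int × List Int) (out : List (List Int × List Int)) : Decidable (Spec_S_Wrepns_D tau out) := by unfold Spec_S_Wrepns_D; infer_instance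

-- ===== CLAIM (what is proved, stated in full; the proofs are below) =====
def Claim_equal_S_Wrepns_D : Prop := ∀ (tau : List Int × List Int), Dom_S_Wrepns_D tau → Pre_S_Wrepns_D tau → Spec_S_Wrepns_D tau (S_Wrepns_D tau)
def Claim_raises_S_Wrepns_D : Prop := (∀ (tau : List Int × List Int), Dom_S_Wrepns_D tau → Raises_S_Wrepns_D tau → ¬ Pre_S_Wrepns_D tau) ∧ (Dom_S_Wrepns_D (pvRaiseWitness_S_Wrepns_D) ∧ Raises_S_Wrepns_D (pvRaiseWitness_S_Wrepns_D) ∧ S_Wrepns_D_alt (pvRaiseWitness_S_Wrepns_D) = pvRaiseWitnessOut_S_Wrepns_D)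

-- ===== LEMMAS AND PROOFS =====

-- ---- proof-layer view of the subset lattice: combinations with the unused suffix attached ----
def combP : List Int → Nat → List (List Int × List Int)
  | l, 0 => [([], l)]
  | [], _ + 1 => []
  | x :: xs, k + 1 => (combP xs k).map (fun p => (x :: p.1, p.2)) ++ combP xs (k + 1)

def sp : List Int → List (Int × List Int)
  | [] => []
  | x :: xs => (x, xs) :: sp xs

theorem combP_map_fst (l : List Int) (k : Nat) :
    (combP l k).map Prod.fst = PySem.List.combinations l k := by
  induction l generalizing k with
  | nil => cases k <;> simp [combP, PySem.List.combinations_zero, PySem.List.combinations_nil_succ]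
  | cons x xs ih =>
    cases k with
    | zero => simp [combP, PySem.List.combinations_zero]
    | succ k =>
      simp only [combP, List.map_append, List.map_map, PySem.List.combinations_cons_succ, ← ih]
      congr 1

theorem combP_eq_nil_of_lt (l : List Int) (k : Nat) (h : l.length < k) : combP l k = [] := by
  have := combP_map_fst l k
  rw [PySem.List.combinations_eq_nil_of_length_lt l h] at this
  simpa using this

theorem combP_ne_nil_of_le (l : List Int) (k : Nat) (h : k ≤ l.length) : combP l k ≠ [] := by
  intro hnil
  have hm : l.take k ∈ PySem.List.combinations l k :=
    (PySem.List.mem_combinations_iff l k (l.take k)).2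
      ⟨(l.take_prefix k).sublist, by simp [List.length_take, Nat.min_eq_left h]⟩
  rw [← combP_map_fst, hnil] at hm
  simp at hm

-- lexicographic step: (k+1)-combinations = k-combinations each extended by one later element
theorem combP_step (l : List Int) (k : Nat) :
    combP l (k + 1)
      = (combP l k).flatMap (fun p => (sp p.2).map (fun q => (p.1 ++ [q.1], q.2))) := by
  induction l generalizing k with
  | nil => cases k <;> simp [combP, sp]
  | cons x xs ih =>
    cases k with
    | zero =>
      simp only [combP, sp, List.flatMap_cons, List.flatMap_nil, List.append_nil, List.map_cons,
        List.nil_append]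
      rw [ih 0]
      simp [combP, List.flatMap_cons]
    | succ k =>
      simp only [combP, List.flatMap_append, List.flatMap_map, ← ih]
      congr 1
      rw [ih k, List.map_flatMap]
      apply List.flatMap_congr
      intro p _
      simp [List.map_map, Function.comp_def]

theorem childrenB_eq_sp (tauL tauR : List Int) (rest LL RR : List Int) :
    childrenB tauL tauR rest LL RR
      = (sp rest).map (fun q =>
          (q.2, PySem.List.pySetD LL (q.1 - 1) (PySem.List.pyGetD tauR q.1 0 + 1),
                PySem.List.pySetD RR q.1 (PySem.List.pyGetD tauL (q.1 - 1) 0 - 1))) := by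
  induction rest with
  | nil => simp [childrenB, sp]
  | cons i r ih => simp [childrenB, sp, ih]

-- the state a BFS node carries for the subset S with unused suffix r: (r, flips applied to L, R)
def stateB (L R : List Int) (p : List Int × List Int) : List Int × List Int × List Int :=
  (p.2,
   p.1.foldl (fun acc i => PySem.List.pySetD acc (i - 1) (PySem.List.pyGetD R i 0 + 1)) L,
   p.1.foldl (fun acc i => PySem.List.pySetD acc i (PySem.List.pyGetD L (i - 1) 0 - 1)) R)

theorem frontier_step (L R cidxs : List Int) (k : Nat) :
    ((combP cidxs k).map (stateB L R)).flatMap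
        (fun n => childrenB L R n.1 n.2.1 n.2.2)
      = (combP cidxs (k + 1)).map (stateB L R) := by
  rw [List.flatMap_map, combP_step, List.map_flatMap]
  apply List.flatMap_congr
  intro p _
  rw [childrenB_eq_sp]
  rw [List.map_map]
  apply List.map_congr_left
  intro q _
  simp [stateB, List.foldl_append]

-- the BFS from level k produces exactly the levels k, k+1, …, len(cidxs), in order
theorem bfsB_levels (L R cidxs : List Int) (fuel k : Nat)
    (h : cidxs.length < k + fuel) :
    bfsB L R fuel ((combP cidxs k).map (stateB L R))
      = (List.range' k (cidxs.length + 1 - k)).flatMap (fun j =>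
          (combP cidxs j).map (fun p =>
            (dsortB ((stateB L R p).2.1), dsortB ((stateB L R p).2.2)))) := by
  induction fuel generalizing k with
  | zero =>
    have : cidxs.length + 1 - k = 0 := by omega
    rw [this]
    simp [bfsB]
  | succ f ihf =>
    by_cases hk : k ≤ cidxs.length
    · obtain ⟨t, ts, hts⟩ := List.exists_cons_of_ne_nil (combP_ne_nil_of_le cidxs k hk)
      have hstep := frontier_step L R cidxs k
      rw [hts] at hstep
      simp only [List.map_cons] at hstep
      rw [hts, List.map_cons]
      simp only [bfsB]
      rw [hstep, ihf (k + 1) (by omega)]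
      have hn : cidxs.length + 1 - k = (cidxs.length - k) + 1 := by omega
      have hn2 : cidxs.length + 1 - (k + 1) = cidxs.length - k := by omega
      rw [hn2, hn, List.range'_succ, List.flatMap_cons]
      congr 1
      rw [hts]
      simp [List.map_map, Function.comp_def]
    · rw [combP_eq_nil_of_lt cidxs k (by omega)]
      have : cidxs.length + 1 - k = 0 := by omega
      rw [this]
      simp [bfsB]

-- ---- per-subset equality with A's comprehension-built pair (scatter = comprehension) ----
theorem sorted_rev_eq_reverse (xs : List Int) :
    PySem.List.sorted xs (fun x => x) true = (PySem.List.sorted xs (fun x => x) false).reverse := by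
  refine List.Perm.eq_of_pairwise (le := fun a b : Int => b ≤ a)
    (fun a b _ _ h1 h2 => le_antisymm h2 h1)
    (PySem.List.sorted_pairwise_rev xs (fun x => x))
    ((List.pairwise_reverse).2 (PySem.List.sorted_pairwise xs (fun x => x)))
    (((PySem.List.sorted_perm xs (fun x => x) true).trans
      (PySem.List.sorted_perm xs (fun x => x) false).symm).trans (List.reverse_perm _).symm)

theorem dsortB_eq_reg (xs : List Int) :
    dsortB xs = PySem.List.sorted (xs.filter (fun x => x ≠ 0)) (fun x => x) true := by
  unfold dsortB
  rw [PySem.List.slice?_none_none_neg_one]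
  rw [sorted_rev_eq_reverse]
  rfl

theorem scatter_getElem? (l : List Int) (off : Int) (w : Int → Int) (base : List Int)
    (hmem : ∀ i ∈ l, 0 ≤ i - off ∧ i - off < (base.length : Int)) (j : Nat) :
    (l.foldl (fun acc i => PySem.List.pySetD acc (i - off) (w i)) base)[j]?
      = if ((j : Int) + off) ∈ l ∧ j < base.length then some (w ((j : Int) + off))
        else base[j]? := by
  induction l generalizing base with
  | nil => simp
  | cons h t ih =>
    have hh := hmem h (List.mem_cons_self ..)
    have hset : PySem.List.pySetD base (h - off) (w h) = base.set (h - off).toNat (w h) :=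
      PySem.List.pySetD_of_nonneg base (w h) hh.1
    rw [List.foldl_cons, hset]
    rw [ih (base.set (h - off).toNat (w h))
      (fun i hi => by simp only [List.length_set]; exact hmem i (List.mem_cons_of_mem _ hi))]
    simp only [List.length_set]
    by_cases hmemt : ((j : Int) + off) ∈ t ∧ j < base.length
    · simp [hmemt, List.mem_cons.2 (Or.inr hmemt.1)]
    · by_cases heq : (j : Int) + off = h ∧ j < base.length
      · have hidx : (h - off).toNat = j := by omega
        rw [if_neg hmemt, if_pos ⟨List.mem_cons.2 (Or.inl heq.1), heq.2⟩]
        rw [List.getElem?_set, if_pos hidx]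
        simp [heq.1]
        omega
      · have hcase : ¬ (((j : Int) + off) ∈ (h :: t) ∧ j < base.length) := by
          intro ⟨hm, hlt⟩
          rcases List.mem_cons.1 hm with h1 | h2
          · exact heq ⟨h1, hlt⟩
          · exact hmemt ⟨h2, hlt⟩
        have hne : (h - off).toNat ≠ j ∨ ¬ j < base.length := by
          by_cases hlt : j < base.length
          · left; intro hx; exact heq ⟨by omega, hlt⟩
          · right; exact hlt
        simp only [hmemt, hcase, if_false]
        rcases hne with hne | hne
        · simp [hne]
        · rw [List.getElem?_eq_none (by simpa using Nat.le_of_not_lt hne),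
            List.getElem?_eq_none (Nat.le_of_not_lt hne)]

theorem LL_eq (L R : List Int) (hpos : 0 < L.length)
    (oidxs : List Int) (hm : ∀ i ∈ oidxs, 1 ≤ i ∧ i < (L.length : Int)) :
    oidxs.foldl (fun acc i => PySem.List.pySetD acc (i - 1) (PySem.List.pyGetD R i 0 + 1)) L
      = ((PySem.List.pyRange 1 (PySem.List.len L) 1).map (fun i =>
          if oidxs.contains i then PySem.List.pyGetD R i 0 + 1
          else PySem.List.pyGetD L (i - 1) 0))
        ++ [PySem.List.pyGetD L (PySem.List.len L - 1) 0] := by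
  apply List.ext_getElem?
  intro j
  rw [scatter_getElem? oidxs 1 _ L
    (fun i hi => ⟨by have := (hm i hi).1; omega, by have := (hm i hi).2; omega⟩)]
  have hlenmap : ((PySem.List.pyRange 1 (PySem.List.len L) 1).map (fun i =>
      if oidxs.contains i then PySem.List.pyGetD R i 0 + 1
      else PySem.List.pyGetD L (i - 1) 0)).length = L.length - 1 := by
    simp [PySem.List.length_pyRange_one, PySem.List.len_eq]
  by_cases hj : j < L.length - 1
  · rw [List.getElem?_append_left (by omega)]
    rw [List.getElem?_map]
    rw [PySem.List.getElem?_pyRange_one]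
    have e1 : (1:Int) + (j:Int) = (j:Int) + 1 := by ring
    by_cases hmem' : ((j:Int) + 1) ∈ oidxs
    · rw [if_pos ⟨hmem', by omega⟩]
      simp [e1, hmem']
      omega
    · rw [if_neg (by intro ⟨h1, _⟩; exact hmem' h1)]
      have hcon : oidxs.contains ((1:Int) + (j:Int)) = false := by
        rw [e1]; simpa using hmem'
      simp only [List.getElem?_eq_getElem (by omega : j < L.length)]
      simp
      refine ⟨by omega, ?_⟩
      rw [if_neg (by rw [e1]; exact hmem')]
      simp [List.getElem?_eq_getElem (by omega : j < L.length)]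
  · by_cases hj2 : j = L.length - 1
    · subst hj2
      rw [List.getElem?_append_right (by omega), hlenmap]
      have h0 : L.length - 1 - (L.length - 1) = 0 := by omega
      rw [h0]
      have hnm : ¬ ((((L.length - 1 : Nat) : Int) + 1) ∈ oidxs ∧ L.length - 1 < L.length) := by
        intro ⟨hmem', _⟩
        have := (hm _ hmem').2
        omega
      rw [if_neg hnm]
      have e : PySem.List.len L - 1 = ((L.length - 1 : Nat) : Int) := by
        simp [PySem.List.len_eq]; omega
      rw [e, PySem.List.pyGetD_natCast]
      simp [List.getElem?_eq_getElem (by omega : L.length - 1 < L.length)]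
    · have hge : L.length ≤ j := by omega
      rw [List.getElem?_append_right (by omega), hlenmap]
      have hnm : ¬ (((j:Int) + 1) ∈ oidxs ∧ j < L.length) := by
        intro ⟨_, h2⟩; omega
      rw [if_neg hnm, List.getElem?_eq_none (by omega)]
      rw [List.getElem?_eq_none (by simp; omega)]

theorem RR_eq (L R : List Int) (hlen : R.length = L.length) (hpos : 0 < L.length)
    (oidxs : List Int) (hm : ∀ i ∈ oidxs, 1 ≤ i ∧ i < (L.length : Int)) :
    oidxs.foldl (fun acc i => PySem.List.pySetD acc i (PySem.List.pyGetD L (i - 1) 0 - 1)) R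
      = [PySem.List.pyGetD R 0 0] ++ (PySem.List.pyRange 1 (PySem.List.len L) 1).map (fun i =>
          if oidxs.contains i then PySem.List.pyGetD L (i - 1) 0 - 1
          else PySem.List.pyGetD R i 0) := by
  have hfun : (fun (acc : List Int) (i : Int) =>
      PySem.List.pySetD acc i (PySem.List.pyGetD L (i - 1) 0 - 1))
      = (fun (acc : List Int) (i : Int) =>
      PySem.List.pySetD acc (i - 0) (PySem.List.pyGetD L (i - 1) 0 - 1)) := by
    funext acc i; rw [sub_zero]
  rw [hfun]
  apply List.ext_getElem?
  intro j
  rw [scatter_getElem? oidxs 0 _ R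
    (fun i hi => ⟨by have := (hm i hi).1; omega, by have := (hm i hi).2; omega⟩)]
  by_cases hj0 : j = 0
  · subst hj0
    have hnm : ¬ (((0:Nat):Int) + 0 ∈ oidxs ∧ 0 < R.length) := by
      intro ⟨h1, _⟩; have := (hm _ h1).1; simp at this
    rw [if_neg hnm]
    simp [PySem.List.pyGetD_zero, List.getElem?_eq_getElem (by omega : 0 < R.length)]
  · by_cases hj : j < R.length
    · rw [List.getElem?_append_right (by simp; omega)]
      simp only [List.length_cons, List.length_nil]
      rw [List.getElem?_map, PySem.List.getElem?_pyRange_one]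
      have e : (1:Int) + ((j - 1 : Nat):Int) = (j:Int) := by omega
      by_cases hmem' : ((j:Int) + 0) ∈ oidxs
      · rw [if_pos ⟨hmem', hj⟩]
        have hmem'' : ((j:Int)) ∈ oidxs := by simpa using hmem'
        simp [e, hmem'']
        omega
      · rw [if_neg (by intro ⟨h1, _⟩; exact hmem' h1)]
        have hmem'' : ¬ ((j:Int)) ∈ oidxs := by simpa using hmem'
        simp only [List.getElem?_eq_getElem hj]
        simp [e, hmem'']
        refine ⟨by omega, ?_⟩
        simp [List.getElem?_eq_getElem hj]
    · rw [if_neg (by intro ⟨_, h2⟩; omega), List.getElem?_eq_none (by omega)]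
      rw [List.getElem?_eq_none (by simp [PySem.List.length_pyRange_one]; omega)]

-- ---- main proof ----
theorem S_Wrepns_D_spec : Claim_equal_S_Wrepns_D := by
  intro tau _ hpre
  obtain ⟨hlen, hne⟩ := hpre
  unfold Spec_S_Wrepns_D S_Wrepns_D S_Wrepns_D_alt
  simp only [PySem.List.len_eq]
  have hL : (PySem.List.sorted tau.1 (fun x => x) false).length = tau.1.length :=
    PySem.List.length_sorted tau.1 (fun x => x) false
  have hR : (PySem.List.sorted tau.2 (fun x => x) false).length = tau.2.length :=
    PySem.List.length_sorted tau.2 (fun x => x) false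
  generalize hLdef : PySem.List.sorted tau.1 (fun x => x) false = L at *
  generalize hRdef : PySem.List.sorted tau.2 (fun x => x) false = R at *
  have hRL : R.length = L.length := by rw [hL, hR, hlen]
  have hpos : 0 < L.length := by rw [hL]; exact List.length_pos_iff.2 hne
  have hcast : (tau.1.length : Int) = (L.length : Int) := by rw [hL]
  rw [hcast]
  set cidxs := (PySem.List.pyRange 1 (L.length : Int) 1).filter
      (fun i => PySem.List.pyGetD L (i - 1) 0 ≠ PySem.List.pyGetD R i 0 + 1) with hcid
  -- A's double foldl becomes a flatMap of mapped combinations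
  have hinner : (fun (Atau : List (List Int × List Int)) (k : Int) =>
      (PySem.List.combinations cidxs k.toNat).foldl (fun Atau oidxs =>
        Atau ++ [reg_tau
          (((PySem.List.pyRange 1 (L.length : Int) 1).map (fun i =>
              if oidxs.contains i then PySem.List.pyGetD R i 0 + 1
              else PySem.List.pyGetD L (i - 1) 0)) ++ [PySem.List.pyGetD L ((L.length : Int) - 1) 0],
           [PySem.List.pyGetD R 0 0] ++ (PySem.List.pyRange 1 (L.length : Int) 1).map (fun i =>
              if oidxs.contains i then PySem.List.pyGetD L (i - 1) 0 - 1
              else PySem.List.pyGetD R i 0))]) Atau)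
      = (fun Atau k => Atau ++ (PySem.List.combinations cidxs k.toNat).map (fun oidxs =>
          reg_tau
          (((PySem.List.pyRange 1 (L.length : Int) 1).map (fun i =>
              if oidxs.contains i then PySem.List.pyGetD R i 0 + 1
              else PySem.List.pyGetD L (i - 1) 0)) ++ [PySem.List.pyGetD L ((L.length : Int) - 1) 0],
           [PySem.List.pyGetD R 0 0] ++ (PySem.List.pyRange 1 (L.length : Int) 1).map (fun i =>
              if oidxs.contains i then PySem.List.pyGetD L (i - 1) 0 - 1
              else PySem.List.pyGetD R i 0)))) := by
    funext Atau k
    exact PySem.List.foldl_append_singleton_eq_map _ _ _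
  rw [hinner, PySem.List.foldl_append_eq_flatMap]
  -- range over Int → range over Nat
  have hrange : ((cidxs.length : Int) + 1) = ((cidxs.length + 1 : Nat) : Int) := by push_cast; ring
  rw [hrange, PySem.List.pyRange_zero_natCast, List.flatMap_map]
  -- B's BFS run
  have hinit : ([(cidxs, L, R)] : List (List Int × List Int × List Int))
      = (combP cidxs 0).map (stateB L R) := by
    simp [combP, stateB]
  rw [hinit, bfsB_levels L R cidxs (cidxs.length + 1) 0 (by omega)]
  rw [Nat.sub_zero, ← List.range_eq_range', List.nil_append]
  apply List.flatMap_congr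
  intro k _
  rw [Int.toNat_natCast, ← combP_map_fst, List.map_map]
  apply List.map_congr_left
  intro p hp
  have hmemP : p.1 ∈ PySem.List.combinations cidxs k := by
    rw [← combP_map_fst]; exact List.mem_map_of_mem hp
  have hsub := PySem.List.sublist_of_mem_combinations hmemP
  have hm : ∀ i ∈ p.1, 1 ≤ i ∧ i < (L.length : Int) := by
    intro i hi
    have hic := hsub.mem hi
    have := (List.mem_filter.1 hic).1
    exact PySem.List.mem_pyRange_one.1 this
  have hLLe := LL_eq L R hpos p.1 hm
  have hRRe := RR_eq L R hRL hpos p.1 hm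
  simp only [PySem.List.len_eq] at hLLe hRRe
  simp only [Function.comp_def, stateB]
  rw [hLLe, hRRe]
  unfold reg_tau
  rw [dsortB_eq_reg, dsortB_eq_reg]

-- ===== VERDICT =====
theorem S_Wrepns_D_raises : Claim_raises_S_Wrepns_D := by
  unfold Claim_raises_S_Wrepns_D
  constructor
  · intro tau _ hr hpre
    exact hpre.2 hr.1
  · exact ⟨by decide, by decide, by decide⟩

-- witness self-check: the crash-fix value above is the one B's port actually computes
theorem pvRaiseWitness_S_Wrepns_D_ok :
    S_Wrepns_D_alt pvRaiseWitness_S_Wrepns_D = pvRaiseWitnessOut_S_Wrepns_D := by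
  have h := S_Wrepns_D_raises
  unfold Claim_raises_S_Wrepns_D at h
  exact h.2.2.2
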